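-- pv_equiv track=rewrite | github.com/nitishkumar03382/love-babbar-dsa-python | Searching_and_Sorting/Lecture15_Book_Allocation.py | allocate_pages
-- ===== SOURCE A (Python) =====
-- def is_possible_solution(books, num_books, num_students, pages):
--     std_cnt = 1
--     page_sum = 0
--     for p in books:
--         if p + page_sum <= pages:
--             page_sum += p
--         else:
--             std_cnt += 1
--             if std_cnt > num_students or p > pages:
--                 return False
--             page_sum = p
--     return True
--
-- def allocate_pages(books, num_books, num_students):
--     total_pages = sum(books)
--     s, e = 0, total_pages
--     s_count = 1
--     ans = -1
--     while s <= e: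
--         mid = s + (e - s) // 2
--         if is_possible_solution(books, num_books, num_students, mid):
--             ans = mid
--             e = mid - 1
--         else:
--             s = mid + 1
--     return ans
--
--
--
--     return total_pages
-- ===== SOURCE B (Python) =====
-- def allocate_pages(books, num_books, num_students):
--     def feasible(pages):
--         # one full pass, failures recorded in a flag instead of early returns
--         cnt, cur, bad = 1, 0, False
--         for p in books:
--             if cur + p > pages:
--                 cnt += 1
--                 if cnt > num_students or p > pages:
--                     bad = True
--                 cur = p
--             else:
--                 cur += p
--         return not bad
--
--     def search(lo, hi):
--         # recursive bisection returning the smallest feasible value found, -1 if none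
--         if lo > hi:
--             return -1
--         mid = (lo + hi) // 2
--         if feasible(mid):
--             found = search(lo, mid - 1)
--             return mid if found == -1 else found
--         return search(mid + 1, hi)
--
--     return search(0, sum(books))
-- ===== Notes on version B (the rewrite author's own statement) =====
-- stated objective: alternative
-- what changed: The best-so-far binary-search loop is restructured as a recursive bisection that returns the minimum found (no ans accumulator), and the early-return greedy feasibility check becomes a single full pass that records failures in a flag.
import Mathlib
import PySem

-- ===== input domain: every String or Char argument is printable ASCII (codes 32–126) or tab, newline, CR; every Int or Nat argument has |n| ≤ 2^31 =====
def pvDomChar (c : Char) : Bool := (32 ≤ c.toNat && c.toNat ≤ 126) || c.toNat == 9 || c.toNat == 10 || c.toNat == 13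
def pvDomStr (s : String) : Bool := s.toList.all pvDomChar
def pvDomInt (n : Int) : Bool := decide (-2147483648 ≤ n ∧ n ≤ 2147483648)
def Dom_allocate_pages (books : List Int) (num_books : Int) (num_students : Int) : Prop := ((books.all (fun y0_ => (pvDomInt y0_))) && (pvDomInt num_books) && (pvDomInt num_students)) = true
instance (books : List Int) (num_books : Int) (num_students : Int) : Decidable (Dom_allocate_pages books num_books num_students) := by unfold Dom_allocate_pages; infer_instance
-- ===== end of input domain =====

-- B restructures A (same cost): recursive bisection returning the minimum instead of a
-- best-so-far accumulator loop, and a full-pass flag-fold feasibility check instead of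
-- an early-return greedy loop.

-- ===== PORT A =====
-- the for-loop of is_possible_solution, state (std_cnt, page_sum), with Python's early returns
def isPossibleLoop (num_students pages : Int) : List Int → Int → Int → Bool
  | [], _, _ => true
  | p :: rest, std_cnt, page_sum =>
    if p + page_sum ≤ pages then
      isPossibleLoop num_students pages rest std_cnt (page_sum + p)
    else if std_cnt + 1 > num_students ∨ p > pages then false
    else isPossibleLoop num_students pages rest (std_cnt + 1) p

def is_possible_solution (books : List Int) (num_books num_students pages : Int) : Bool :=
  isPossibleLoop num_students pages books 1 0

-- A's while-loop, state (s, e, ans); fuel = interval length + 1 (adequate: the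
-- interval shrinks every iteration), so the recursion is structural
def allocLoop (books : List Int) (num_books num_students : Int) : Nat → Int → Int → Int → Int
  | 0, _, _, ans => ans
  | fuel + 1, s, e, ans =>
    if s ≤ e then
      let mid := s + PySem.Int.floordiv (e - s) 2
      if is_possible_solution books num_books num_students mid then
        allocLoop books num_books num_students fuel s (mid - 1) mid
      else
        allocLoop books num_books num_students fuel (mid + 1) e ans
    else ans

def allocate_pages (books : List Int) (num_books : Int) (num_students : Int) : Int :=
  let total_pages := books.sum
  allocLoop books num_books num_students ((total_pages + 1).toNat + 1) 0 total_pages (-1)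

-- ===== PORT B =====
-- Source B's feasible(pages): one full pass over books, failures recorded in a flag
def feasibleAlt (books : List Int) (num_students pages : Int) : Bool :=
  let st := books.foldl
    (fun (st : Int × Int × Bool) p =>
      if st.2.1 + p > pages then
        (st.1 + 1, p, st.2.2 || decide (st.1 + 1 > num_students) || decide (p > pages))
      else
        (st.1, st.2.1 + p, st.2.2))
    (1, 0, false)
  !st.2.2

-- Source B's search(lo, hi): recursive bisection returning the smallest feasible value
-- found; same fuel device for structural recursion
def searchAlt (books : List Int) (num_students : Int) : Nat → Int → Int → Int
  | 0, _, _ => -1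
  | fuel + 1, lo, hi =>
    if lo > hi then -1
    else
      let mid := PySem.Int.floordiv (lo + hi) 2
      if feasibleAlt books num_students mid then
        let found := searchAlt books num_students fuel lo (mid - 1)
        if found = -1 then mid else found
      else searchAlt books num_students fuel (mid + 1) hi

def allocate_pages_alt (books : List Int) (num_books : Int) (num_students : Int) : Int :=
  searchAlt books num_students ((books.sum + 1).toNat + 1) 0 books.sum

-- ===== PRECONDITION & SPEC =====
def Spec_allocate_pages (books : List Int) (num_books : Int) (num_students : Int) (out : Int) : Prop := out = allocate_pages_alt books num_books num_students
instance (books : List Int) (num_books : Int) (num_students : Int) (out : Int) : Decidable (Spec_allocate_pages books num_books num_students out) := by unfold Spec_allocate_pages; infer_instance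

-- ===== CLAIM (what is proved, stated in full; the proofs are below) =====
def Claim_equal_allocate_pages : Prop := ∀ (books : List Int) (num_books : Int) (num_students : Int), Dom_allocate_pages books num_books num_students → Spec_allocate_pages books num_books num_students (allocate_pages books num_books num_students)

-- ===== LEMMAS AND PROOFS =====

-- once B's failure flag is set it stays set, and the final flag is true
lemma feas_fold_sticky (num_students pages : Int) (l : List Int) (cnt cur : Int) :
    (l.foldl
      (fun (st : Int × Int × Bool) p =>
        if pages < st.2.1 + p then
          (st.1 + 1, p, st.2.2 || decide (num_students ≤ st.1) || decide (pages < p))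
        else
          (st.1, st.2.1 + p, st.2.2))
      (cnt, cur, true)).2.2 = true := by
  induction l generalizing cnt cur with
  | nil => simp
  | cons p rest ih =>
    simp only [List.foldl_cons]
    split_ifs <;> simpa using ih _ _

-- A's early-return loop equals the negation of B's failure flag
lemma loop_eq_fold (num_students pages : Int) (l : List Int) (cnt cur : Int) :
    isPossibleLoop num_students pages l cnt cur =
      !(l.foldl
        (fun (st : Int × Int × Bool) p =>
          if st.2.1 + p > pages then
            (st.1 + 1, p, st.2.2 || decide (st.1 + 1 > num_students) || decide (p > pages))
          else
            (st.1, st.2.1 + p, st.2.2))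
        (cnt, cur, false)).2.2 := by
  induction l generalizing cnt cur with
  | nil => simp [isPossibleLoop]
  | cons p rest ih =>
    simp only [isPossibleLoop, List.foldl_cons]
    by_cases h1 : p + cur ≤ pages
    · have h1' : ¬ (cur + p > pages) := by omega
      simp [h1, h1', ih]
    · have h1' : cur + p > pages := by omega
      by_cases h2 : cnt + 1 > num_students ∨ p > pages
      · have hflag : (decide (num_students ≤ cnt) || decide (pages < p)) = true := by
          rcases h2 with h2 | h2
          · have h3 : num_students ≤ cnt := by omega
            simp [h3]
          · simp [h2]
        have hlhs : (!decide (num_students ≤ cnt) && !decide (pages < p)) = false := by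
          rcases h2 with h2 | h2
          · have h3 : num_students ≤ cnt := by omega
            simp [h3]
          · simp [h2]
        simp [h1, h1', hflag]
        exact feas_fold_sticky num_students pages rest (cnt + 1) p
      · push Not at h2
        have hb1 : ¬ (cnt + 1 > num_students) := by omega
        have hb2 : ¬ (p > pages) := by omega
        simp [h1, h1', hb1, hb2, ih]

lemma feasible_eq (books : List Int) (num_books num_students pages : Int) :
    is_possible_solution books num_books num_students pages = feasibleAlt books num_students pages := by
  simp [is_possible_solution, feasibleAlt, loop_eq_fold]

-- A's midpoint s + (e-s)//2 is B's (lo+hi)//2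
lemma mid_eq (s e : Int) (h : s ≤ e) :
    s + PySem.Int.floordiv (e - s) 2 = PySem.Int.floordiv (s + e) 2 := by
  have h1 : PySem.Int.floordiv (e - s) 2 = (e - s) / 2 :=
    PySem.Int.floordiv_eq_ediv_of_pos (by omega)
  have h2 : PySem.Int.floordiv (s + e) 2 = (s + e) / 2 :=
    PySem.Int.floordiv_eq_ediv_of_pos (by omega)
  rw [h1, h2]
  omega

-- the accumulator loop of A computes B's recursive minimum (falling back to ans),
-- for any two adequate fuels
lemma alloc_eq_search (books : List Int) (num_books num_students : Int) :
    ∀ (fa fb : Nat) (s e ans : Int),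
      (e - s + 1).toNat < fa → (e - s + 1).toNat < fb → 0 ≤ s →
      allocLoop books num_books num_students fa s e ans =
        (if searchAlt books num_students fb s e = -1 then ans
         else searchAlt books num_students fb s e) := by
  intro fa
  induction fa with
  | zero => intro fb s e ans hfa hfb hs; omega
  | succ fa ih =>
    intro fb s e ans hfa hfb hs
    obtain ⟨fb', rfl⟩ : ∃ fb', fb = fb' + 1 := ⟨fb - 1, by omega⟩
    by_cases hle : s ≤ e
    · have hng : ¬ s > e := by omega
      have hmid := PySem.Int.floordiv_two_mid_bounds hle
      have hmeq := mid_eq s e hle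
      simp only [allocLoop, searchAlt, hle, hng, if_pos, if_neg,
        not_false_iff, hmeq]
      set mid := PySem.Int.floordiv (s + e) 2 with hmdef
      rw [feasible_eq]
      by_cases hf : feasibleAlt books num_students mid = true
      · simp only [hf, if_pos]
        rw [ih fb' s (mid - 1) mid (by omega) (by omega) hs]
        by_cases hr : searchAlt books num_students fb' s (mid - 1) = -1
        · simp [hr]
          omega
        · simp [hr]
      · simp only [Bool.not_eq_true] at hf
        simp only [hf, Bool.false_eq_true, if_false]
        exact ih fb' (mid + 1) e ans (by omega) (by omega) (by omega)
    · have hgt : s > e := by omega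
      simp [allocLoop, searchAlt, hle, hgt]

-- ===== VERDICT (by name: the statement is the Claim_ definition above) =====
theorem allocate_pages_spec : Claim_equal_allocate_pages := by
  intro books num_books num_students _
  have h := alloc_eq_search books num_books num_students ((books.sum + 1).toNat + 1)
    ((books.sum + 1).toNat + 1) 0 books.sum (-1) (by omega) (by omega) le_rfl
  unfold Spec_allocate_pages allocate_pages allocate_pages_alt
  simp only []
  rw [h]
  split_ifs with h2
  · omega
  · rfl
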